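-- pv_equiv track=rewrite | github.com/ochavirar/FCC--Toolkit | ExpressionsProcessing.py | get_main_literals_values
-- ===== SOURCE A (Python) =====
-- def get_main_literals_values(literals):
--     values_p_literal = 2**len(literals)  # Total values per literal
--     final_evaluation = []  # Array to return
--     partial_evaluation = []  # Array to complete final_evaluation
--     dictionary = {}
--     sequence = values_p_literal  # Sequence between true and false,
--     for i in range(0, len(literals), 1):  # For i in every literal
--         sequence /= 2  # Sequence is reduced
--         found_booleans = 0  # Found booleans
--         step = 0  # Step starting in zero
--         partial_evaluation.clear()  # Clears array to use again later
--         while found_booleans < values_p_literal:  # While found booleans is less than 2^n spaces...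
--             if step < sequence:  # If step is less than the sequence...
--                 partial_evaluation.append(bool(1))  # Appends true
--                 found_booleans += 1  # One boolean was found
--                 step += 1  # Step increases
--             elif step >= sequence:  # Else If step is greater or equal than the sequence...
--                 partial_evaluation.append(bool(0))  # Appends false
--                 found_booleans += 1  # One boolean was found
--                 step += 1  # Step increases
--             if step >= sequence*2:  # If step is less than the double of the sequence...
--                 step = 0  # Step resets
--         support_variable = partial_evaluation.copy()  # Partial evaluation is stored in a variable
--         final_evaluation.append(support_variable)  # Appends support variable to the final array
--         dictionary[literals[i]] = support_variable
--     return dictionary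
-- ===== SOURCE B (Python) =====
-- def get_main_literals_values(literals):
--     n = len(literals)
--     total = 2 ** n
--     return {lit: [(r // 2 ** (n - 1 - i)) % 2 == 0 for r in range(total)]
--             for i, lit in enumerate(literals)}
-- ===== Notes on version B (the rewrite author's own statement) =====
-- stated objective: simpler
-- what changed: Replaces A's per-column while loop with its step/found/reset counters by a dict comprehension that computes each cell directly from the row index's binary structure ((r // 2**(n-1-i)) % 2 == 0).
import Mathlib
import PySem

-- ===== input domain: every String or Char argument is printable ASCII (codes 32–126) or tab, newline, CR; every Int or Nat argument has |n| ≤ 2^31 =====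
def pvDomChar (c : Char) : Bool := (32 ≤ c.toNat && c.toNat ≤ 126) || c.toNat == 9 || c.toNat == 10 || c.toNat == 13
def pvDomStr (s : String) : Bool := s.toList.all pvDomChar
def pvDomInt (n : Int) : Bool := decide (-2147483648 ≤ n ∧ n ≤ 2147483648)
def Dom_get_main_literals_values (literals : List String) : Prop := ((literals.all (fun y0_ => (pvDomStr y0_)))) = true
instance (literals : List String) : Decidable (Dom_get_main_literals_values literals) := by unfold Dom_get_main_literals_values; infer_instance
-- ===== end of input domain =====

-- B replaces A's step-counting while loop by reading each truth-table cell off the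
-- row index's binary structure (simpler, same output).

-- ===== PORT A =====
-- A's inner while loop: appends True while step < sequence, else False; step resets at
-- sequence*2. (Python's 'sequence' is a float equal exactly to a power of two here, so
-- the comparisons are exactly the integer comparisons used below.)
def pvA_while (vpl seq : Int) (found step : Int) (acc : List Bool) : List Bool :=
  if h : found < vpl then
    let acc' := if step < seq then acc ++ [true] else acc ++ [false]
    let step' := step + 1
    let step'' := if seq * 2 ≤ step' then 0 else step'
    pvA_while vpl seq (found + 1) step'' acc'
  else acc
termination_by (vpl - found).toNat
decreasing_by omega

-- A's outer for loop over the literals in order: sequence /= 2 (exact halving: sequence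
-- is 2^k with k ≥ 1 when divided), then dictionary[literals[i]] = column.
def pvA_outer (vpl : Int) : Int → List String → PySem.Dict String (List Bool) → PySem.Dict String (List Bool)
  | _, [], d => d
  | seq, lit :: rest, d =>
      let seq' := PySem.Int.floordiv seq 2
      pvA_outer vpl seq' rest (d.insert lit (pvA_while vpl seq' 0 0 []))

def get_main_literals_values (literals : List String) : List (String × List Bool) :=
  let vpl : Int := 2 ^ literals.length
  (pvA_outer vpl vpl literals PySem.Dict.empty).items

-- ===== PORT B =====
-- dict comprehension: {lit: [(r // 2**(n-1-i)) % 2 == 0 for r in range(total)] ...};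
-- all quantities are nonnegative, so Nat division/mod are exactly Python's // and %.
def get_main_literals_values_alt (literals : List String) : List (String × List Bool) :=
  let n := literals.length
  let total := 2 ^ n
  ((PySem.List.enumerate literals).foldl
      (fun d (p : Int × String) =>
        d.insert p.2 ((List.range total).map (fun r => decide (r / 2 ^ (n - 1 - p.1.toNat) % 2 = 0))))
      PySem.Dict.empty).items

-- ===== PRECONDITION & SPEC =====
def Spec_get_main_literals_values (literals : List String) (out : List (String × List Bool)) : Prop := out = get_main_literals_values_alt literals
instance (literals : List String) (out : List (String × List Bool)) : Decidable (Spec_get_main_literals_values literals out) := by unfold Spec_get_main_literals_values; infer_instance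

-- ===== CLAIM (what is proved, stated in full; the proofs are below) =====
def Claim_equal_get_main_literals_values : Prop := ∀ (literals : List String), Dom_get_main_literals_values literals → Spec_get_main_literals_values literals (get_main_literals_values literals)

-- ===== LEMMAS AND PROOFS =====

-- A cell is True iff the step counter (= row mod 2b) is below b, iff the row's
-- (n-1-i)-th binary digit is 0.
theorem pv_cell (b r : Nat) (hb : 0 < b) :
    ((r : Int) % (2 * (b : Int)) < (b : Int)) ↔ (r / b % 2 = 0) := by
  have h1 : r % (b * 2) / b = r / b % 2 := Nat.mod_mul_right_div_self r b 2
  have hcast : (r : Int) % (2 * (b : Int)) = ((r % (2 * b) : Nat) : Int) := by push_cast; ring_nf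
  rw [hcast]
  have : ((r % (2 * b) : Nat) : Int) < (b : Int) ↔ r % (2 * b) < b := by exact_mod_cast Iff.rfl
  rw [this, Nat.mul_comm 2 b, ← h1]
  constructor
  · intro h; exact Nat.div_eq_of_lt h
  · intro h
    have hd := Nat.div_add_mod (r % (b * 2)) b
    have hm : r % (b * 2) % b < b := Nat.mod_lt _ hb
    rw [h, Nat.mul_zero, Nat.zero_add] at hd
    omega

-- the step counter after one increment-and-reset is (r+1) mod 2b
theorem pv_step (b r : Nat) (hb : 0 < b) :
    (r + 1) % (2 * b) = if 2 * b ≤ r % (2 * b) + 1 then 0 else r % (2 * b) + 1 := by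
  have h2b : 0 < 2 * b := by omega
  have hx : r % (2 * b) < 2 * b := Nat.mod_lt _ h2b
  have key : (r + 1) % (2 * b) = (r % (2 * b) + 1) % (2 * b) := by
    conv_lhs => rw [Nat.add_mod]
    rw [Nat.mod_eq_of_lt (show 1 < 2 * b by omega)]
  rw [key]
  split_ifs with h
  · have : r % (2 * b) + 1 = 2 * b := by omega
    rw [this, Nat.mod_self]
  · exact Nat.mod_eq_of_lt (by omega)

-- invariant of A's inner while loop: with found = r and step = r mod 2b it appends
-- the cells of rows r, r+1, … reading each from the row index
theorem pv_while (b : Nat) (hb : 0 < b) (vpl : Int) (fuel : Nat) :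
    ∀ (r : Nat) (acc : List Bool), (vpl - r).toNat = fuel →
    pvA_while vpl (b : Int) r ((r : Int) % (2 * (b : Int))) acc
      = acc ++ (List.range fuel).map (fun j => decide ((r + j) / b % 2 = 0)) := by
  induction fuel with
  | zero =>
      intro r acc h
      rw [pvA_while]
      have hnlt : ¬ ((r : Int) < vpl) := by omega
      simp [hnlt]
  | succ m ih =>
      intro r acc h
      have hlt : (r : Int) < vpl := by omega
      rw [pvA_while, dif_pos hlt]
      have hacc : (if ((r : Int) % (2 * (b : Int)) < (b : Int)) then acc ++ [true] else acc ++ [false])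
          = acc ++ [decide (r / b % 2 = 0)] := by
        by_cases hc : ((r : Int) % (2 * (b : Int)) < (b : Int))
        · rw [if_pos hc]
          have := (pv_cell b r hb).mp hc
          simp [this]
        · rw [if_neg hc]
          have : ¬ (r / b % 2 = 0) := fun hh => hc ((pv_cell b r hb).mpr hh)
          simp [this]
      have hstep : (if (b : Int) * 2 ≤ (r : Int) % (2 * (b : Int)) + 1 then (0 : Int)
            else (r : Int) % (2 * (b : Int)) + 1)
          = (((r + 1 : Nat) : Int) % (2 * (b : Int))) := by
        have hcast : (r : Int) % (2 * (b : Int)) = ((r % (2 * b) : Nat) : Int) := by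
          push_cast; ring_nf
        have hcast' : ((r + 1 : Nat) : Int) % (2 * (b : Int)) = (((r + 1) % (2 * b) : Nat) : Int) := by
          push_cast; ring_nf
        rw [hcast, hcast', pv_step b r hb]
        split_ifs with h1 h2 h2
        · simp
        · exfalso; apply h2; exact_mod_cast (by push_cast; omega : ((2 * b : Nat) : Int) ≤ ((r % (2 * b) + 1 : Nat) : Int))
        · exfalso
          have : ((2 * b : Nat) : Int) ≤ ((r % (2 * b) : Nat) : Int) + 1 := by
            have := h2; push_cast at this ⊢; omega
          omega
        · push_cast; ring
      simp only [hacc]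
      rw [hstep]
      have hr1 : ((r : Int) + 1) = ((r + 1 : Nat) : Int) := by push_cast; ring
      rw [hr1, ih (r + 1) (acc ++ [decide (r / b % 2 = 0)]) (by omega)]
      rw [List.range_succ_eq_map, List.map_cons, List.map_map]
      simp only [List.append_assoc, List.singleton_append, Nat.add_zero]
      congr 1
      congr 1
      refine List.map_congr_left fun j _ => ?_
      simp only [Function.comp_apply, Nat.succ_eq_add_one]
      have hj : r + 1 + j = r + (j + 1) := by omega
      rw [hj]

-- A's outer loop over the remaining literals, sequence = 2^k, equals B's indexed fold
theorem pv_outer (n : Nat) :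
    ∀ (rest : List String) (k : Nat) (d : PySem.Dict String (List Bool)),
    rest.length = k → k ≤ n →
    pvA_outer ((2 : Int) ^ n) ((2 : Int) ^ k) rest d
      = (PySem.List.enumerate rest ((n - k : Nat) : Int)).foldl
          (fun d (p : Int × String) =>
            d.insert p.2 ((List.range (2 ^ n)).map
              (fun r => decide (r / 2 ^ (n - 1 - p.1.toNat) % 2 = 0)))) d := by
  intro rest
  induction rest with
  | nil =>
      intro k d hk hkn
      simp [pvA_outer, PySem.List.enumerate_nil]
  | cons lit rest ih =>
      intro k d hk hkn
      obtain ⟨m, rfl⟩ : ∃ m, k = m + 1 := ⟨rest.length, by simpa using hk.symm⟩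
      have hm : rest.length = m := by simpa using hk
      rw [pvA_outer]
      have hseq : PySem.Int.floordiv ((2 : Int) ^ (m + 1)) 2 = (2 : Int) ^ m := by
        rw [PySem.Int.floordiv_eq_ediv_of_pos (by norm_num), pow_succ]
        exact Int.mul_ediv_cancel _ (by norm_num)
      have hcol : pvA_while ((2 : Int) ^ n) ((2 : Int) ^ m) 0 0 []
          = (List.range (2 ^ n)).map (fun j => decide (j / 2 ^ m % 2 = 0)) := by
        have hb : 0 < 2 ^ m := Nat.two_pow_pos m
        have hcast : ((2 ^ m : Nat) : Int) = (2 : Int) ^ m := by push_cast; ring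
        have := pv_while (2 ^ m) hb ((2 : Int) ^ n) (2 ^ n) 0 [] (by
          have hpow : (2 : Int) ^ n - ((0 : Nat) : Int) = ((2 ^ n : Nat) : Int) := by push_cast; ring
          rw [hpow, Int.toNat_natCast])
        simpa using this
      rw [hseq, hcol]
      have hexp : n - 1 - (n - (m + 1)) = m := by omega
      have hstart : ((n - (m + 1) : Nat) : Int) + 1 = ((n - m : Nat) : Int) := by omega
      rw [PySem.List.enumerate_cons, List.foldl_cons, hstart]
      rw [ih m (d.insert lit ((List.range (2 ^ n)).map (fun j => decide (j / 2 ^ m % 2 = 0)))) hm (by omega)]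
      congr 1
      simp only [Int.toNat_natCast, hexp]

-- ===== VERDICT (by name: the statement is the Claim_ definition above) =====
theorem get_main_literals_values_spec : Claim_equal_get_main_literals_values := by
  intro literals _
  show get_main_literals_values literals = get_main_literals_values_alt literals
  have h := pv_outer literals.length literals literals.length PySem.Dict.empty rfl le_rfl
  simp only [Nat.sub_self, Nat.cast_zero] at h
  simp only [get_main_literals_values, get_main_literals_values_alt, h]
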